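-- pv_equiv track=rewrite | github.com/Lakrofn/Programacion | DAW1/programacion/PYTHON/examenes/primosexy.py | primosexy
-- ===== SOURCE A (Python) =====
-- def primosexy(num1):
--     essexy = True
--     num2 = num1 + 6;
--     num3 = num1 - 6;
--
--
--     for i in range(2, num1):
--         if num1 % i == 0:
--             essexy = False
--     if essexy == True:
--         for i in range(2, num2):
--             if num2 % i == 0:
--                 essexy = False
--     if essexy == True:
--         if num3 > 0:
--             for i in range(2, num3):
--                 if num1 % i == 0:
--                     essexy = False
--     return essexy
-- ===== SOURCE B (Python) =====
-- def primosexy(num1):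
--     # trial division up to sqrt; m < 3 (incl. negatives) has an empty range(2, m), hence "prime" in A's sense
--     def ok(m):
--         if m < 3:
--             return True
--         i = 2
--         while i * i <= m:
--             if m % i == 0:
--                 return False
--             i += 1
--         return True
--     return ok(num1) and ok(num1 + 6)
-- ===== Notes on version B (the rewrite author's own statement) =====
-- stated objective: faster
-- what changed: Replaces A's three full O(n) divisor scans (the third being redundant) with trial division up to sqrt(m) for num1 and num1+6, keeping A's empty-range semantics (m < 3 counts as 'prime').
import Mathlib
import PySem

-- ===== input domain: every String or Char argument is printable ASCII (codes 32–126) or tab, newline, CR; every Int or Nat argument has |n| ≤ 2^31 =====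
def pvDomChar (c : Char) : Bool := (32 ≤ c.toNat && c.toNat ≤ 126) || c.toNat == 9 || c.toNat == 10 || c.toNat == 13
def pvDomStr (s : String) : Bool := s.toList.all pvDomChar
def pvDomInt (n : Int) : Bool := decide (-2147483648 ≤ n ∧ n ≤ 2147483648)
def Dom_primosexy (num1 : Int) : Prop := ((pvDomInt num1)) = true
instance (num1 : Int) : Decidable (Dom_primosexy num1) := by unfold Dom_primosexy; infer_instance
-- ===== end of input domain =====

-- B replaces A's three full divisor scans over range(2, m) with trial division up to sqrt(m)
-- for num1 and num1+6 (objective: faster, O(sqrt n) vs O(n); A's third loop is redundant).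

-- ===== PORT A =====
def primosexy (num1 : Int) : Bool :=
  let num2 := num1 + 6
  let num3 := num1 - 6
  let essexy :=
    (PySem.List.pyRange 2 num1 1).foldl
      (fun b i => if PySem.Int.mod num1 i == 0 then false else b) true
  let essexy :=
    if essexy == true then
      (PySem.List.pyRange 2 num2 1).foldl
        (fun b i => if PySem.Int.mod num2 i == 0 then false else b) essexy
    else essexy
  let essexy :=
    if essexy == true then
      if num3 > 0 then
        (PySem.List.pyRange 2 num3 1).foldl
          (fun b i => if PySem.Int.mod num1 i == 0 then false else b) essexy
      else essexy
    else essexy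
  essexy

-- ===== PORT B =====
-- while i * i <= m: if m % i == 0: return False; i += 1
def pvOkLoop (m : Int) (i : Int) : Bool :=
  if h : i * i ≤ m then
    if PySem.Int.mod m i == 0 then false else pvOkLoop m (i + 1)
  else true
termination_by (m + 1 - i).toNat
decreasing_by
  have hi : i ≤ m := le_trans (by nlinarith) h
  omega

def pvOk (m : Int) : Bool :=
  if m < 3 then true else pvOkLoop m 2

def primosexy_alt (num1 : Int) : Bool :=
  pvOk num1 && pvOk (num1 + 6)

-- ===== PRECONDITION & SPEC =====
def Spec_primosexy (num1 : Int) (out : Bool) : Prop := out = primosexy_alt num1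
instance (num1 : Int) (out : Bool) : Decidable (Spec_primosexy num1 out) := by unfold Spec_primosexy; infer_instance

-- ===== CLAIM (what is proved, stated in full; the proofs are below) =====
def Claim_equal_primosexy : Prop := ∀ (num1 : Int), Dom_primosexy num1 → Spec_primosexy num1 (primosexy num1)

-- ===== LEMMAS AND PROOFS =====

-- scan of A's first/second loop, named for the proofs
def pvScan (m : Int) : Bool :=
  (PySem.List.pyRange 2 m 1).all (fun i => !(PySem.Int.mod m i == 0))

-- A's loop shape: the flag fold is the conjunction of the accumulator with "no hit in the list".
theorem pv_foldl_flag (p : Int → Bool) (l : List Int) (acc : Bool) :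
    l.foldl (fun b i => if p i then false else b) acc = (acc && l.all (fun i => !p i)) := by
  induction l generalizing acc with
  | nil => simp
  | cons x xs ih =>
    simp only [List.foldl_cons, List.all_cons, ih]
    cases hp : p x <;> cases acc <;> simp

-- A's scan over range(2, m) as a proposition.
theorem pv_all_range_iff (m : Int) :
    (pvScan m = true) ↔ (∀ i : Int, 2 ≤ i → i < m → ¬ i ∣ m) := by
  unfold pvScan
  simp only [List.all_eq_true, PySem.List.mem_pyRange_one, Bool.not_eq_eq_eq_not,
    Bool.not_true, beq_eq_false_iff_ne, ne_eq]
  constructor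
  · intro h i h2 hlt hdvd
    exact h i ⟨h2, hlt⟩ ((PySem.Int.mod_eq_zero_iff_dvd m i).mpr hdvd)
  · intro h i hi hmod
    exact h i hi.1 hi.2 ((PySem.Int.mod_eq_zero_iff_dvd m i).mp hmod)

-- B's loop as a proposition (for starting indices ≥ 2, which is all B uses).
theorem pvOkLoop_iff (m j : Int) (hj : 2 ≤ j) :
    (pvOkLoop m j = true) ↔ (∀ i : Int, j ≤ i → i * i ≤ m → ¬ i ∣ m) := by
  unfold pvOkLoop
  split
  · rename_i h
    split
    · rename_i hmod
      simp only [Bool.false_eq_true, false_iff, not_forall]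
      exact ⟨j, le_rfl, h, not_not_intro ((PySem.Int.mod_eq_zero_iff_dvd m j).mp (by simpa using hmod))⟩
    · rename_i hmod
      rw [pvOkLoop_iff m (j + 1) (by omega)]
      constructor
      · intro ih i hji hii hdvd
        rcases eq_or_lt_of_le hji with rfl | hlt
        · exact hmod (by simp [(PySem.Int.mod_eq_zero_iff_dvd m _).mpr hdvd])
        · exact ih i (by omega) hii hdvd
      · intro hall i hji hii hdvd
        exact hall i (by omega) hii hdvd
  · rename_i h
    simp only [true_iff]
    intro i hji hii hdvd
    have : j * j ≤ m := by nlinarith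
    exact h this
termination_by (m + 1 - j).toNat
decreasing_by
  rename_i h _
  have hjm : j ≤ m := le_trans (by nlinarith) h
  omega

-- sqrt bound suffices: for m ≥ 3, no divisor in [2, m) iff no divisor d with d*d ≤ m.
theorem pv_sqrt_bridge (m : Int) (hm : 3 ≤ m) :
    (∀ i : Int, 2 ≤ i → i < m → ¬ i ∣ m) ↔ (∀ i : Int, 2 ≤ i → i * i ≤ m → ¬ i ∣ m) := by
  constructor
  · intro h i h2 hii
    exact h i h2 (by nlinarith)
  · intro h d h2 hlt hdvd
    obtain ⟨e, he⟩ := hdvd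
    have hdpos : 0 < d := by omega
    have hepos : 0 < e := by nlinarith
    have he2 : 2 ≤ e := by
      rcases (by omega : e = 1 ∨ 2 ≤ e) with rfl | h1
      · simp at he; omega
      · exact h1
    by_cases hdd : d * d ≤ m
    · exact h d h2 hdd ⟨e, he⟩
    · push Not at hdd
      have hed : e < d := by nlinarith
      have hee : e * e ≤ m := by nlinarith
      exact h e he2 hee ⟨d, by rw [he]; ring⟩

-- A's one-number scan equals B's pvOk.
theorem pv_scan_eq_ok (m : Int) : pvScan m = pvOk m := by
  unfold pvOk
  split
  · rename_i hm
    unfold pvScan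
    rw [show (PySem.List.pyRange 2 m 1) = [] from PySem.List.pyRange_one_eq_nil (by omega)]
    rfl
  · rename_i hm
    have h3 : 3 ≤ m := by omega
    rw [Bool.eq_iff_iff, pv_all_range_iff, pvOkLoop_iff m 2 le_rfl]
    exact pv_sqrt_bridge m h3

-- A's value is the conjunction of the two scans (the third loop never flips a true flag).
theorem pv_A_eq (n : Int) : primosexy n = (pvScan n && pvScan (n + 6)) := by
  unfold primosexy
  simp only [pv_foldl_flag, Bool.true_and]
  rcases h1 : pvScan n with _ | _ <;> have h1' := h1 <;> unfold pvScan at h1'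
  · simp [h1']
  · rcases h2 : pvScan (n + 6) with _ | _ <;> have h2' := h2 <;> unfold pvScan at h2'
    · simp [h1', h2']
    · -- both scans true: the third loop re-tests divisors of n below n-6, all already clean
      have hall := (pv_all_range_iff n).mp h1
      simp only [h1', h2', beq_self_eq_true, if_pos, Bool.and_self]
      by_cases hpos : (0:Int) < n - 6
      · rw [if_pos hpos]
        simp only [Bool.true_and, List.all_eq_true, PySem.List.mem_pyRange_one]
        intro i hi
        simp only [Bool.not_eq_eq_eq_not, Bool.not_true, beq_eq_false_iff_ne, ne_eq]
        intro hmod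
        exact hall i hi.1 (by omega) ((PySem.Int.mod_eq_zero_iff_dvd n i).mp hmod)
      · rw [if_neg hpos]

-- ===== VERDICT (by name: the statement is the Claim_ definition above) =====
theorem primosexy_spec : Claim_equal_primosexy := by
  intro n _
  unfold Spec_primosexy primosexy_alt
  rw [pv_A_eq, pv_scan_eq_ok, pv_scan_eq_ok]
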